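-- pv_equiv track=rewrite | github.com/tamlog06/AntBook | 2-4/binary-search-tree/ABC_091_B.py | solve
-- ===== SOURCE A (Python) =====
-- from collections import defaultdict
--
-- def solve(N, s, M, t):
--     d_b = defaultdict(int)
--     d_r = defaultdict(int)
--
--     keys = []
--     for b in s:
--         d_b[b] += 1
--         keys.append(b)
--
--     for r in t:
--         d_r[r] += 1
--
--     keys = set(keys)
--
--     ans = 0
--     for key in keys:
--         ans = max(ans, d_b[key] - d_r[key])
--
--     return ans
-- ===== SOURCE B (Python) =====
-- def solve(N, s, M, t):
--     # Sort both lists, then one merge-style sweep: group equal runs of sorted(s)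
--     # and advance a single pointer through sorted(t) to count the matching run.
--     ss = sorted(s)
--     tt = sorted(t)
--     n = len(ss)
--     m = len(tt)
--     ans = 0
--     i = 0
--     j = 0
--     while i < n:
--         key = ss[i]
--         k = i + 1
--         while k < n and ss[k] == key:
--             k += 1
--         while j < m and tt[j] < key:
--             j += 1
--         c = 0
--         while j < m and tt[j] == key:
--             j += 1
--             c += 1
--         ans = max(ans, (k - i) - c)
--         i = k
--     return ans
-- ===== Notes on version B (the rewrite author's own statement) =====
-- stated objective: alternative
-- what changed: B replaces A's two hash counters, keys list and set by sorting both lists and doing one two-pointer merge sweep over the sorted lists, reading run lengths instead of tallying; correct because equal elements are contiguous after sorting and keys are visited in increasing order.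
import Mathlib
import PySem

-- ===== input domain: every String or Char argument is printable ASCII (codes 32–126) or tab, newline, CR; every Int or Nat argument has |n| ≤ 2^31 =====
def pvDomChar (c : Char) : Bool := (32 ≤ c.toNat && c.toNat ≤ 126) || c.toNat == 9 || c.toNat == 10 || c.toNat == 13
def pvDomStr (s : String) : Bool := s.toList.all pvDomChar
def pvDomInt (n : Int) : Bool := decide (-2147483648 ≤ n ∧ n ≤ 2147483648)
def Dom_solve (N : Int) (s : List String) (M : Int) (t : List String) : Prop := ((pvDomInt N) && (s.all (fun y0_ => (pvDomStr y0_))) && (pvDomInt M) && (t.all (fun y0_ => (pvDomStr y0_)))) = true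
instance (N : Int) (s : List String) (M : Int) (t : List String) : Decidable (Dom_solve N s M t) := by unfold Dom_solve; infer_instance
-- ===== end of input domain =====

-- B replaces A's two hash counters + set + subtraction loop by sorting both lists and one
-- two-pointer merge sweep over runs of equal elements (objective: alternative).

-- ===== PORT A =====
-- 'd_b[key]' / 'd_r[key]' on a defaultdict insert the key with 0 on lookup, but the VALUE read is
-- exactly getD _ 0 and neither dict is used afterwards, so getD is exact; the Python set 'keys' is
-- consumed only by an order-independent running max.
def solve (N : Int) (s : List String) (M : Int) (t : List String) : Int :=
  let st := s.foldl (fun (p : PySem.Dict String Int × List String) b =>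
      (p.1.modify b 0 (· + 1), p.2 ++ [b])) (PySem.Dict.empty, [])
  let d_b := st.1
  let d_r := t.foldl (fun (d : PySem.Dict String Int) r => d.modify r 0 (· + 1)) PySem.Dict.empty
  let keys := PySem.Set.ofList st.2
  keys.foldl (fun ans key => max ans (d_b.getD key 0 - d_r.getD key 0)) 0

-- ===== PORT B =====
-- Indexing 'ss[k]' / 'tt[j]' is transliterated as 'getD _ ""': every access is guarded by the
-- loop condition 'k < len', so the default is never read and the port is exact.

-- 'while k < n and ss[k] == key: k += 1'
def runEnd (ss : List String) (key : String) (k : Nat) : Nat :=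
  if _h : k < ss.length ∧ ss.getD k "" = key then runEnd ss key (k + 1) else k
termination_by ss.length - k
decreasing_by omega

-- 'while j < m and tt[j] < key: j += 1'
def skipLt (tt : List String) (key : String) (j : Nat) : Nat :=
  if _h : j < tt.length ∧ tt.getD j "" < key then skipLt tt key (j + 1) else j
termination_by tt.length - j
decreasing_by omega

-- 'c = 0; while j < m and tt[j] == key: j += 1; c += 1'  (returns the new j and c)
def countEq (tt : List String) (key : String) (j : Nat) (c : Nat) : Nat × Nat :=
  if _h : j < tt.length ∧ tt.getD j "" = key then countEq tt key (j + 1) (c + 1) else (j, c)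
termination_by tt.length - j
decreasing_by omega

-- the run-end pointer never moves backwards (needed for the outer loop's termination)
lemma runEnd_ge (ss : List String) (key : String) : ∀ k, k ≤ runEnd ss key k := by
  intro k
  induction hn : ss.length - k using Nat.strong_induction_on generalizing k with
  | _ n ih =>
    rw [runEnd]
    split
    · rename_i h
      have := ih (ss.length - (k + 1)) (by omega) (k + 1) rfl
      omega
    · exact le_refl k

-- the outer 'while i < n' loop
def outer (ss tt : List String) (i j : Nat) (ans : Int) : Int :=
  if hi : i < ss.length then
    let key := ss.getD i ""
    let k := runEnd ss key (i + 1)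
    let j1 := skipLt tt key j
    let jc := countEq tt key j1 0
    outer ss tt k jc.1 (max ans ((k : Int) - (i : Int) - (jc.2 : Int)))
  else ans
termination_by ss.length - i
decreasing_by exact Nat.sub_lt_sub_left hi (Nat.lt_of_lt_of_le (Nat.lt_succ_self i) (runEnd_ge ss _ (i + 1)))

def solve_alt (N : Int) (s : List String) (M : Int) (t : List String) : Int :=
  let ss := PySem.List.sorted s (fun x => x) false
  let tt := PySem.List.sorted t (fun x => x) false
  outer ss tt 0 0 0

-- ===== PRECONDITION & SPEC =====
def Spec_solve (N : Int) (s : List String) (M : Int) (t : List String) (out : Int) : Prop := out = solve_alt N s M t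
instance (N : Int) (s : List String) (M : Int) (t : List String) (out : Int) : Decidable (Spec_solve N s M t out) := by unfold Spec_solve; infer_instance

-- ===== CLAIM (what is proved, stated in full; the proofs are below) =====
def Claim_equal_solve : Prop := ∀ (N : Int) (s : List String) (M : Int) (t : List String), Dom_solve N s M t → Spec_solve N s M t (solve N s M t)

-- ===== LEMMAS AND PROOFS =====

-- each inner while loop measured against takeWhile on the dropped suffix
lemma runEnd_eq (ss : List String) (key : String) : ∀ k,
    runEnd ss key k = k + ((ss.drop k).takeWhile (fun x => decide (x = key))).length := by
  intro k
  induction hn : ss.length - k using Nat.strong_induction_on generalizing k with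
  | _ n ih =>
    rw [runEnd]
    split
    · rename_i h
      rw [ih (ss.length - (k + 1)) (by omega) (k + 1) rfl]
      rw [List.drop_eq_getElem_cons h.1, List.takeWhile_cons]
      have : ss.getD k "" = ss[k] := by simp [List.getD_eq_getElem?_getD, List.getElem?_eq_getElem h.1]
      rw [this] at h
      simp [h.2]
      omega
    · rename_i h
      by_cases hk : k < ss.length
      · have hne : ¬ ss.getD k "" = key := fun he => h ⟨hk, he⟩
        have : ss.getD k "" = ss[k] := by simp [List.getD_eq_getElem?_getD, List.getElem?_eq_getElem hk]
        rw [this] at hne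
        rw [List.drop_eq_getElem_cons hk, List.takeWhile_cons]
        simp [hne]
      · rw [List.drop_eq_nil_of_le (by omega)]
        simp

lemma skipLt_eq (tt : List String) (key : String) : ∀ j,
    skipLt tt key j = j + ((tt.drop j).takeWhile (fun x => decide (x < key))).length := by
  intro j
  induction hn : tt.length - j using Nat.strong_induction_on generalizing j with
  | _ n ih =>
    rw [skipLt]
    split
    · rename_i h
      rw [ih (tt.length - (j + 1)) (by omega) (j + 1) rfl]
      rw [List.drop_eq_getElem_cons h.1, List.takeWhile_cons]
      have : tt.getD j "" = tt[j] := by simp [List.getD_eq_getElem?_getD, List.getElem?_eq_getElem h.1]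
      rw [this] at h
      simp [h.2]
      omega
    · rename_i h
      by_cases hj : j < tt.length
      · have hne : ¬ tt.getD j "" < key := fun he => h ⟨hj, he⟩
        have : tt.getD j "" = tt[j] := by simp [List.getD_eq_getElem?_getD, List.getElem?_eq_getElem hj]
        rw [this] at hne
        rw [List.drop_eq_getElem_cons hj, List.takeWhile_cons]
        simp [hne]
      · rw [List.drop_eq_nil_of_le (by omega)]
        simp

lemma countEq_eq (tt : List String) (key : String) : ∀ j c,
    countEq tt key j c
      = (j + ((tt.drop j).takeWhile (fun x => decide (x = key))).length,
         c + ((tt.drop j).takeWhile (fun x => decide (x = key))).length) := by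
  intro j
  induction hn : tt.length - j using Nat.strong_induction_on generalizing j with
  | _ n ih =>
    intro c
    rw [countEq]
    split
    · rename_i h
      rw [ih (tt.length - (j + 1)) (by omega) (j + 1) rfl]
      rw [List.drop_eq_getElem_cons h.1, List.takeWhile_cons]
      have : tt.getD j "" = tt[j] := by simp [List.getD_eq_getElem?_getD, List.getElem?_eq_getElem h.1]
      rw [this] at h
      simp [h.2]
      constructor <;> omega
    · rename_i h
      by_cases hj : j < tt.length
      · have hne : ¬ tt.getD j "" = key := fun he => h ⟨hj, he⟩
        have : tt.getD j "" = tt[j] := by simp [List.getD_eq_getElem?_getD, List.getElem?_eq_getElem hj]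
        rw [this] at hne
        rw [List.drop_eq_getElem_cons hj, List.takeWhile_cons]
        simp [hne]
      · rw [List.drop_eq_nil_of_le (by omega)]
        simp

-- in a sorted list all of whose elements are ≥ key, the initial run of key IS its count
lemma takeWhile_length_eq_count (key : String) : ∀ (l : List String), l.Pairwise (· ≤ ·) →
    (∀ y ∈ l, key ≤ y) → ((l.takeWhile (fun x => decide (x = key))).length : Int) = l.count key := by
  intro l
  induction l with
  | nil => intro _ _; simp
  | cons a l ih =>
    intro hp hall
    obtain ⟨h1, h2⟩ := List.pairwise_cons.mp hp
    by_cases ha : a = key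
    · subst ha
      rw [List.takeWhile_cons]
      simp only [decide_true, if_true, List.length_cons, List.count_cons_self]
      have hih := ih h2 (fun y hy => hall y (List.mem_cons_of_mem a hy))
      push_cast at hih ⊢
      omega
    · have hlt : key < a := lt_of_le_of_ne (hall a List.mem_cons_self) (Ne.symm ha)
      rw [List.takeWhile_cons]
      have hcz : (a :: l).count key = 0 := by
        rw [List.count_eq_zero]
        intro hmem
        rcases List.mem_cons.mp hmem with h | h
        · exact ha h.symm
        · exact absurd (lt_of_lt_of_le hlt (h1 _ h)) (lt_irrefl key)
      simp [ha, hcz]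

-- every element surviving dropWhile (· < key) in a sorted list is ≥ key
lemma dropWhile_lt_ge (key : String) : ∀ (l : List String), l.Pairwise (· ≤ ·) →
    ∀ y ∈ l.dropWhile (fun x => decide (x < key)), key ≤ y := by
  intro l
  induction l with
  | nil => intro _ y hy; simp at hy
  | cons a l ih =>
    intro hp y hy
    obtain ⟨h1, h2⟩ := List.pairwise_cons.mp hp
    rw [List.dropWhile_cons] at hy
    by_cases ha : a < key
    · simp only [ha, decide_true, if_true] at hy
      exact ih h2 y hy
    · simp only [ha, decide_false, if_false] at hy
      rcases List.mem_cons.mp hy with h | h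
      · subst h; exact le_of_not_gt ha
      · exact le_trans (le_of_not_gt ha) (h1 _ h)

-- every element surviving dropWhile (· = key) in a sorted list of elements ≥ key is > key
lemma dropWhile_eq_gt (key : String) : ∀ (l : List String), l.Pairwise (· ≤ ·) →
    (∀ y ∈ l, key ≤ y) → ∀ y ∈ l.dropWhile (fun x => decide (x = key)), key < y := by
  intro l
  induction l with
  | nil => intro _ _ y hy; simp at hy
  | cons a l ih =>
    intro hp hall y hy
    obtain ⟨h1, h2⟩ := List.pairwise_cons.mp hp
    rw [List.dropWhile_cons] at hy
    by_cases ha : a = key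
    · simp only [ha, decide_true, if_true] at hy
      exact ih h2 (fun z hz => hall z (List.mem_cons_of_mem a hz)) y hy
    · simp only [ha, decide_false, if_false] at hy
      have hka : key < a := lt_of_le_of_ne (hall a List.mem_cons_self) (Ne.symm ha)
      rcases List.mem_cons.mp hy with h | h
      · subst h; exact hka
      · exact lt_of_lt_of_le hka (h1 _ h)

-- folding max over a nonempty constant list is one max
lemma foldl_max_replicate (v a : Int) : ∀ r, 1 ≤ r → (List.replicate r v).foldl max a = max a v := by
  intro r
  induction r generalizing a with
  | zero => intro h; omega
  | succ r ih =>
    intro _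
    rw [List.replicate_succ, List.foldl_cons]
    cases Nat.eq_zero_or_pos r with
    | inl h0 => subst h0; simp
    | inr hpos =>
      rw [ih (max a v) hpos]
      omega

-- a running max over two lists with the same MEMBERS is the same value
lemma foldl_max_eq (xs ys : List Int) (a : Int) (h : ∀ v, v ∈ xs ↔ v ∈ ys) :
    xs.foldl max a = ys.foldl max a := by
  apply le_antisymm
  · rcases PySem.List.foldl_max_mem xs a with h0 | hmem
    · rw [h0]; exact (PySem.List.le_foldl_max ys a).1
    · exact (PySem.List.le_foldl_max ys a).2 _ ((h _).mp hmem)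
  · rcases PySem.List.foldl_max_mem ys a with h0 | hmem
    · rw [h0]; exact (PySem.List.le_foldl_max xs a).1
    · exact (PySem.List.le_foldl_max xs a).2 _ ((h _).mpr hmem)

-- the heart: the merge sweep computes the running max of count-surpluses over the remaining suffix
lemma outer_eq (ss tt : List String) (hss : ss.Pairwise (· ≤ ·)) (htt : tt.Pairwise (· ≤ ·)) :
    ∀ (i j : Nat) (ans : Int),
    (∀ x ∈ ss.take i, ∀ y ∈ ss.drop i, x < y) →
    (∀ x ∈ tt.take j, ∀ y ∈ ss.drop i, x < y) →
    outer ss tt i j ans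
      = ((ss.drop i).map (fun k => (ss.count k : Int) - (tt.count k : Int))).foldl max ans := by
  intro i
  induction hn : ss.length - i using Nat.strong_induction_on generalizing i with
  | _ n ih =>
    intro j ans hprev hj
    rw [outer]
    split
    · rename_i hi
      dsimp only
      -- abbreviations
      have hgetD : ss.getD i "" = ss[i] := by
        simp [List.getD_eq_getElem?_getD, List.getElem?_eq_getElem hi]
      set key := ss.getD i "" with hkeydef
      have hu : ss.drop i = ss[i] :: ss.drop (i + 1) := List.drop_eq_getElem_cons hi
      have hui : (ss.drop i).Pairwise (· ≤ ·) := hss.sublist (List.drop_sublist _ _)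
      have hall_u : ∀ y ∈ ss.drop i, key ≤ y := by
        intro y hy
        rw [hu] at hy
        rcases List.mem_cons.mp hy with h | h
        · rw [hgetD, h]
        · rw [hu] at hui
          rw [hgetD]
          exact (List.pairwise_cons.mp hui).1 y h
      have hkey_mem : key ∈ ss.drop i := by rw [hu, hgetD]; exact List.mem_cons_self
      -- the s-side run
      set R := (ss.drop i).takeWhile (fun x => decide (x = key)) with hRdef
      set Dk := (ss.drop i).dropWhile (fun x => decide (x = key)) with hDkdef
      have hsplit : ss.drop i = R ++ Dk := (List.takeWhile_append_dropWhile).symm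
      have hRcons : R = ss[i] :: (ss.drop (i + 1)).takeWhile (fun x => decide (x = key)) := by
        rw [hRdef, hu, List.takeWhile_cons]
        simp [← hgetD]
      have hrun : runEnd ss key (i + 1) = i + R.length := by
        rw [runEnd_eq, hRcons]
        simp
        omega
      set k := runEnd ss key (i + 1) with hkdef
      have hki : i < k := by rw [hrun, hRcons]; simp
      have hdropk : ss.drop k = Dk := by
        rw [hrun, ← List.drop_drop, hsplit, List.drop_left]
      have hRmem : ∀ x ∈ R, x = key := by
        intro x hx
        have := List.mem_takeWhile_imp hx
        simpa using this
      have hDk_gt : ∀ y ∈ Dk, key < y := dropWhile_eq_gt key (ss.drop i) hui hall_u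
      have hDk_sub : ∀ y ∈ Dk, y ∈ ss.drop i := fun y hy => (List.dropWhile_sublist _).subset hy
      -- run length = count in ss
      have hcount_s : (R.length : Int) = (ss.count key : Int) := by
        have h1 : (R.length : Int) = ((ss.drop i).count key : Int) :=
          takeWhile_length_eq_count key (ss.drop i) hui hall_u
        have h2 : ss.count key = (ss.take i).count key + (ss.drop i).count key := by
          conv_lhs => rw [← List.take_append_drop i ss]
          rw [List.count_append]
        have h3 : (ss.take i).count key = 0 := by
          rw [List.count_eq_zero]
          intro hmem
          exact absurd (hprev key hmem key hkey_mem) (lt_irrefl key)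
        rw [h1, h2, h3]
        simp
      -- the t-side pointers
      set p := (tt.drop j).takeWhile (fun x => decide (x < key)) with hpdef
      set E := (tt.drop j).dropWhile (fun x => decide (x < key)) with hEdef
      have htsplit : tt.drop j = p ++ E := (List.takeWhile_append_dropWhile).symm
      have hj1 : skipLt tt key j = j + p.length := skipLt_eq tt key j
      set j1 := skipLt tt key j with hj1def
      have hdropj1 : tt.drop j1 = E := by
        rw [hj1, ← List.drop_drop, htsplit, List.drop_left]
      have htj : (tt.drop j).Pairwise (· ≤ ·) := htt.sublist (List.drop_sublist _ _)
      have hE_pair : E.Pairwise (· ≤ ·) := htj.sublist (List.dropWhile_sublist _)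
      have hE_ge : ∀ y ∈ E, key ≤ y := dropWhile_lt_ge key (tt.drop j) htj
      set q := E.takeWhile (fun x => decide (x = key)) with hqdef
      have hcq : countEq tt key j1 0 = (j1 + q.length, 0 + q.length) := by
        rw [countEq_eq, hdropj1]
      -- c = count in tt
      have hcount_t : (q.length : Int) = (tt.count key : Int) := by
        have h1 : (q.length : Int) = (E.count key : Int) :=
          takeWhile_length_eq_count key E hE_pair hE_ge
        have h2 : tt.count key = (tt.take j).count key + p.count key + E.count key := by
          conv_lhs => rw [← List.take_append_drop j tt]
          rw [List.count_append, htsplit, List.count_append]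
          omega
        have h3 : (tt.take j).count key = 0 := by
          rw [List.count_eq_zero]
          intro hmem
          exact absurd (hj key hmem key hkey_mem) (lt_irrefl key)
        have h4 : p.count key = 0 := by
          rw [List.count_eq_zero]
          intro hmem
          have h5 := List.mem_takeWhile_imp hmem
          simp at h5
        rw [h1, h2, h3, h4]
        simp
      have hq_mem : ∀ x ∈ q, x = key := by
        intro x hx
        have := List.mem_takeWhile_imp hx
        simpa using this
      have hp_lt : ∀ x ∈ p, x < key := by
        intro x hx
        have := List.mem_takeWhile_imp hx
        simpa using this
      have hc1 : (countEq tt key j1 0).1 = j1 + q.length := by rw [hcq]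
      have hc2 : ((countEq tt key j1 0).2 : Int) = (tt.count key : Int) := by
        rw [hcq, ← hcount_t]
        push_cast
        omega
      -- new accumulator value
      have hnewans : (k : Int) - (i : Int) - ((countEq tt key j1 0).2 : Int)
          = (ss.count key : Int) - (tt.count key : Int) := by
        rw [hc2, hrun, ← hcount_s]
        push_cast
        ring
      -- invariants for the recursive call
      have htakek : ss.take k = ss.take i ++ R := by
        rw [hrun, List.take_add, hsplit, List.take_left]
      have hprev' : ∀ x ∈ ss.take k, ∀ y ∈ ss.drop k, x < y := by
        intro x hx y hy
        rw [hdropk] at hy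
        rw [htakek] at hx
        rcases List.mem_append.mp hx with h | h
        · exact hprev x h y (hDk_sub y hy)
        · rw [hRmem x h]; exact hDk_gt y hy
      have hEq : E.take q.length = q := by
        conv_lhs =>
          rw [show E = q ++ E.dropWhile (fun x => decide (x = key)) from
            (List.takeWhile_append_dropWhile).symm]
        exact List.take_left
      have htakej2 : tt.take (j1 + q.length) = tt.take j ++ p ++ q := by
        rw [hj1, Nat.add_assoc, List.take_add, htsplit, List.take_length_add_append, hEq,
          List.append_assoc]
      have hj' : ∀ x ∈ tt.take (j1 + q.length), ∀ y ∈ ss.drop k, x < y := by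
        intro x hx y hy
        rw [hdropk] at hy
        rw [htakej2] at hx
        rcases List.mem_append.mp hx with h | h
        · rcases List.mem_append.mp h with h2 | h2
          · exact hj x h2 y (hDk_sub y hy)
          · exact lt_trans (hp_lt x h2) (hDk_gt y hy)
        · rw [hq_mem x h]; exact hDk_gt y hy
      -- apply the induction hypothesis
      have hih := ih (ss.length - k) (by omega) k rfl ((countEq tt key j1 0).1)
        (max ans ((k : Int) - (i : Int) - ((countEq tt key j1 0).2 : Int)))
        hprev' (by rw [hc1]; exact hj')
      rw [hih, hnewans, hdropk]
      -- fold the run into one max on the right-hand side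
      conv_rhs => rw [hsplit]
      rw [List.map_append, List.foldl_append]
      have hRmap : R.map (fun k_ => (ss.count k_ : Int) - (tt.count k_ : Int))
          = List.replicate R.length ((ss.count key : Int) - (tt.count key : Int)) := by
        have hcg : R.map (fun k_ => (ss.count k_ : Int) - (tt.count k_ : Int))
            = R.map (fun _ => ((ss.count key : Int) - (tt.count key : Int))) :=
          List.map_congr_left (fun x hx => by rw [hRmem x hx])
        rw [hcg, List.map_const']
      rw [hRmap, foldl_max_replicate _ _ _ (by rw [hRcons]; simp)]
    · rename_i hi
      rw [List.drop_eq_nil_of_le (by omega)]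
      simp

-- ===== VERDICT (by name: the statement is the Claim_ definition above) =====
theorem solve_spec : Claim_equal_solve := by
  intro N s M t _
  unfold Spec_solve solve solve_alt
  rw [PySem.List.foldl_prod_mk (f := fun (d : PySem.Dict String Int) b => d.modify b 0 (· + 1))
        (g := fun (ks : List String) b => ks ++ [b])]
  simp only [PySem.List.foldl_append_singleton_eq_self, List.nil_append]
  -- A's two dicts are counters
  have hdb : ∀ k, (s.foldl (fun (d : PySem.Dict String Int) b => d.modify b 0 (· + 1))
      PySem.Dict.empty).getD k 0 = (s.count k : Int) := by
    intro k; simpa using PySem.Dict.getD_foldl_modify_add_one s PySem.Dict.empty k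
  have hdr : ∀ k, (t.foldl (fun (d : PySem.Dict String Int) r => d.modify r 0 (· + 1))
      PySem.Dict.empty).getD k 0 = (t.count k : Int) := by
    intro k; simpa using PySem.Dict.getD_foldl_modify_add_one t PySem.Dict.empty k
  simp only [hdb, hdr]
  -- B's sweep is the running max over the whole sorted list
  set ss := PySem.List.sorted s (fun x => x) false with hssdef
  set tt := PySem.List.sorted t (fun x => x) false with httdef
  have hss : ss.Pairwise (· ≤ ·) := PySem.List.sorted_pairwise s (fun x => x)
  have htt : tt.Pairwise (· ≤ ·) := PySem.List.sorted_pairwise t (fun x => x)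
  rw [outer_eq ss tt hss htt 0 0 0 (by simp) (by simp)]
  simp only [List.drop_zero]
  -- replace sorted counts by original counts
  have hperm_s : ss.Perm s := PySem.List.sorted_perm s (fun x => x) false
  have hperm_t : tt.Perm t := PySem.List.sorted_perm t (fun x => x) false
  have hcnt : ∀ k, ((ss.count k : Int) - (tt.count k : Int)) = ((s.count k : Int) - (t.count k : Int)) := by
    intro k
    rw [hperm_s.count_eq, hperm_t.count_eq]
  rw [List.map_congr_left (fun k _ => hcnt k)]
  -- both sides are running maxes over key lists with the same members
  rw [← List.foldl_map (f := fun k => (s.count k : Int) - (t.count k : Int)) (g := max)]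
  apply foldl_max_eq
  intro v
  constructor
  · intro hv
    rcases List.mem_map.mp hv with ⟨k, hk, rfl⟩
    refine List.mem_map_of_mem ?_
    rw [hssdef, PySem.List.mem_sorted]
    exact (PySem.Set.mem_ofList _ _).mp hk
  · intro hv
    rcases List.mem_map.mp hv with ⟨k, hk, rfl⟩
    rw [hssdef, PySem.List.mem_sorted] at hk
    exact List.mem_map_of_mem ((PySem.Set.mem_ofList _ _).mpr hk)
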